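-- pv_equiv track=rewrite | github.com/dkatina/152-Recursion | recursion.py | reco_check
-- ===== SOURCE A (Python) =====
-- def reco_check(companies):
--     if not companies: #Base Case
--         return "Okay"
--
--     checking_company = companies.pop()
--     for system in checking_company:
--         if system == "F":
--             return "Not Okay"
--
--     status = reco_check(companies)
--     return status
-- ===== SOURCE B (Python) =====
-- def reco_check(companies):
--     # Iterative rewrite of A's recursion: pop from the end (same in-place
--     # mutation of the argument as A) and early-return on the first "F".
--     while companies:
--         company = companies.pop()
--         if any(system == "F" for system in company):
--             return "Not Okay"
--     return "Okay"
-- ===== Notes on version B (the rewrite author's own statement) =====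
-- stated objective: simpler
-- what changed: Replaces A's tail recursion (one Python stack frame per company) with a plain iterative while/pop loop using any() for the inner scan; the in-place consumption of the argument list is preserved.
import Mathlib
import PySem

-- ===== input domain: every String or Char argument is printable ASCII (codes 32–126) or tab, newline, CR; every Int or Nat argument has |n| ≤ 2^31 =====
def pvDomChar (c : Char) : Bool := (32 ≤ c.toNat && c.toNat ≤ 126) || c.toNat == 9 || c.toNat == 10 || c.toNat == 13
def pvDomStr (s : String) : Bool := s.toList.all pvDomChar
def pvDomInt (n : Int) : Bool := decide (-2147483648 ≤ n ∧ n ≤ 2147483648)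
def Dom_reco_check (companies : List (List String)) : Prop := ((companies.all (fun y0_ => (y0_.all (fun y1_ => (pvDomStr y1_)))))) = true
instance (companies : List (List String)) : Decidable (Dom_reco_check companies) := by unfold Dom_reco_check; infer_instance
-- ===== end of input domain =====

-- B replaces A's recursion by an iterative pop-loop; equivalence proved for the
-- RETURN value only (both Pythons consume the argument list in place identically).

-- ===== PORT A =====
-- A's inner `for system in checking_company: if system == "F": return ...` loop
def scanF : List String → Bool
  | [] => false
  | s :: rest => if s == "F" then true else scanF rest

def reco_check (companies : List (List String)) : String :=
  if h : companies = [] then "Okay"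
  else
    -- companies.pop() takes the LAST element and leaves the rest
    let checking_company := companies.getLast h
    if scanF checking_company then "Not Okay"
    else reco_check companies.dropLast
termination_by companies.length
decreasing_by
  have : companies.length ≠ 0 := by simpa using h
  simp [List.length_dropLast]; omega

-- ===== PORT B =====
-- the `while companies:` loop of Source B, consuming from the end (hence over reverse)
def recoLoop : List (List String) → String
  | [] => "Okay"
  | company :: rest =>
      if company.any (fun system => system == "F") then "Not Okay" else recoLoop rest

def reco_check_alt (companies : List (List String)) : String :=
  recoLoop companies.reverse

-- ===== PRECONDITION & SPEC =====
def Spec_reco_check (companies : List (List String)) (out : String) : Prop := out = reco_check_alt companies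
instance (companies : List (List String)) (out : String) : Decidable (Spec_reco_check companies out) := by unfold Spec_reco_check; infer_instance

-- ===== CLAIM (what is proved, stated in full; the proofs are below) =====
def Claim_equal_reco_check : Prop := ∀ (companies : List (List String)), Dom_reco_check companies → Spec_reco_check companies (reco_check companies)

-- ===== LEMMAS AND PROOFS =====
theorem scanF_eq_any (l : List String) : scanF l = l.any (fun system => system == "F") := by
  induction l with
  | nil => rfl
  | cons s rest ih => by_cases h : s == "F" <;> simp [scanF, h, ih]

theorem reco_check_eq_alt (companies : List (List String)) :
    reco_check companies = reco_check_alt companies := by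
  induction companies using List.reverseRecOn with
  | nil => simp [reco_check, reco_check_alt, recoLoop]
  | append_singleton l c ih =>
      rw [reco_check]
      simp [reco_check_alt, scanF_eq_any, recoLoop, ih]

-- ===== VERDICT (by name: the statement is the Claim_ definition above) =====
theorem reco_check_spec : Claim_equal_reco_check := by
  intro companies _
  unfold Spec_reco_check
  exact reco_check_eq_alt companies
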